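-- pv_equiv track=rewrite | github.com/VeiledTee/LectureLanguageModels | Education RA/preprocessing.py | parse_quiz
-- ===== SOURCE A (Python) =====
-- from typing import Any, Optional
--
-- def parse_quiz(md_text: str) -> list[str]:
--     """
--     Parse markdown text representing a quiz with hierarchical sections.
--
--     Headers (lines starting with '#' characters) signify sections, subsections, and questions.
--     Lines between headers are considered content for the preceding header.
--     The hierarchy is built dynamically based on header levels. If a header of a lower level is found,
--     the current stack is popped until the header level matches. The function returns a list of
--     concatenated paths (using ' > ') from the root to each leaf node.
--
--     Args:
--         md_text (str): The markdown text to parse.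
--
--     Returns:
--         list[str]: A list of full question paths in the form "Section > Subsection > ... > Question".
--     """
--     lines: list[str] = md_text.splitlines()
--     root: list[dict[str, Any]] = []
--     stack: list[dict[str, Any]] = []
--
--     for line in lines:
--         line = line.rstrip()
--         if not line.strip():
--             continue
--         if line.startswith("#"):
--             # Determine header level and text.
--             level = 0
--             while level < len(line) and line[level] == "#":
--                 level += 1
--             header = line[level:].strip()
--             node: dict[str, Any] = {
--                 "level": level,
--                 "header": header,
--                 "content": "",
--                 "children": [],
--             }
--             # Pop until the top of the stack is of a lower level.
--             while stack and stack[-1]["level"] >= level: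
--                 stack.pop()
--             if stack:
--                 stack[-1]["children"].append(node)
--             else:
--                 root.append(node)
--             stack.append(node)
--         else:
--             # Append non-header content to the current header.
--             if stack:
--                 current = stack[-1]
--                 current["content"] = (
--                     (current["content"] + " " + line.strip()).strip()
--                     if current["content"]
--                     else line.strip()
--                 )
--
--     questions: list[str] = []
--
--     def traverse(path: list[str], node: dict[str, Any]) -> None:
--         text = node["header"]
--         if node["content"]:
--             text += " " + node["content"]
--         new_path = path + [text]
--         if not node["children"]:
--             questions.append(" > ".join(new_path))
--         else:
--             for child in node["children"]:
--                 traverse(new_path, child)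
--
--     for node in root:
--         traverse([], node)
--
--     return questions
-- ===== SOURCE B (Python) =====
-- def parse_quiz(md_text: str) -> list[str]:
--     """Single-pass stack parser: no tree is built; leaf question paths are
--     emitted directly from the live stack of open sections."""
--     stack: list[list] = []  # frames [level, header, content, has_child]
--     questions: list[str] = []
--
--     def text_of(frame) -> str:
--         level, header, content, _ = frame
--         return header + " " + content if content else header
--
--     def pop_frames(new_level) -> None:
--         # Pop frames whose level >= new_level (None pops everything),
--         # emitting the full path of every popped childless frame.
--         while stack and (new_level is None or stack[-1][0] >= new_level):
--             top = stack.pop()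
--             if not top[3]:
--                 questions.append(
--                     " > ".join([text_of(f) for f in stack] + [text_of(top)])
--                 )
--
--     for line in md_text.splitlines():
--         line = line.rstrip()
--         if not line.strip():
--             continue
--         if line.startswith("#"):
--             level = 0
--             while level < len(line) and line[level] == "#":
--                 level += 1
--             header = line[level:].strip()
--             pop_frames(level)
--             if stack:
--                 stack[-1][3] = True
--             stack.append([level, header, "", False])
--         elif stack:
--             c = line.strip()
--             top = stack[-1]
--             top[2] = (top[2] + " " + c).strip() if top[2] else c
--
--     pop_frames(None)
--     return questions
-- ===== Notes on version B (the rewrite author's own statement) =====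
-- stated objective: alternative
-- what changed: B never builds the node tree A constructs: it keeps only a stack of (level, header, content, has_child) frames and emits each leaf question's full path directly at the moment its frame is popped, replacing A's second recursive DFS pass over the finished tree.
import Mathlib
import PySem

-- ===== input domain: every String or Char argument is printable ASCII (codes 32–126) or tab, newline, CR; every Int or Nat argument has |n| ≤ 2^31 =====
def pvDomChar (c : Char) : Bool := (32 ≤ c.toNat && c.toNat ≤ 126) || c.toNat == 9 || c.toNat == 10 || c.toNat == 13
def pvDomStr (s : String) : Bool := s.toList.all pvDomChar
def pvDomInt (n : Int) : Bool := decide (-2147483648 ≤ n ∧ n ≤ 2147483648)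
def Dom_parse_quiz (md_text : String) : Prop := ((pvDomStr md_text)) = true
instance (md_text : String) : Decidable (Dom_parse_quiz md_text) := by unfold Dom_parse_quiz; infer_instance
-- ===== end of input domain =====

-- B replaces A's tree building + recursive DFS by a single stack pass emitting leaf paths at pop time (objective: alternative decomposition, same cost).

-- ===== PORT A =====
-- Shared per-line primitives (both Pythons contain these identical lines).
-- level = number of leading '#' (the while loop of A, also used by B)
def pvHashLevel : List Char → Nat
  | [] => 0
  | c :: rest => if c = '#' then pvHashLevel rest + 1 else 0

-- text = header + " " + content if content else header  (A's traverse / B's text_of)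
def pvText (h c : String) : String := if c ≠ "" then h ++ " " ++ c else h

-- content update: (content + " " + line.strip()).strip() if content else line.strip()
def pvAddContent (cont c : String) : String :=
  if cont ≠ "" then PySem.Str.strip (cont ++ " " ++ c) else c

-- A's dict nodes with mutable children lists, as a tree (mutual pair; no nested inductive).
mutual
inductive PNode : Type where
  | mk : Nat → String → String → PForest → PNode
inductive PForest : Type where
  | nil : PForest
  | cons : PNode → PForest → PForest
end

-- children.append(node)
def PForest.snoc : PForest → PNode → PForest
  | .nil, n => .cons n .nil
  | .cons m t, n => .cons m (PForest.snoc t n)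

-- A mutates nodes through live references on the stack; the port represents the
-- stack as frames (level, header, content, children-so-far) and attaches a node to
-- its parent (or to root) at the moment it is popped — the same tree results.
def popA : Nat → List PNode → List (Nat × String × String × PForest) →
    List PNode × List (Nat × String × String × PForest)
  | _, roots, [] => (roots, [])
  | L, roots, f :: rest =>
    if L ≤ f.1 then
      let n := PNode.mk f.1 f.2.1 f.2.2.1 f.2.2.2
      match rest with
      | [] => (roots ++ [n], [])
      | g :: rs => popA L roots ((g.1, g.2.1, g.2.2.1, PForest.snoc g.2.2.2 n) :: rs)
    else (roots, f :: rest)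
  termination_by _ _ s => s.length

-- at end of input the pending frames form one path: attach them to obtain A's tree
def attachA : List PNode → List (Nat × String × String × PForest) → List PNode
  | roots, [] => roots
  | roots, f :: rest =>
    let n := PNode.mk f.1 f.2.1 f.2.2.1 f.2.2.2
    match rest with
    | [] => roots ++ [n]
    | g :: rs => attachA roots ((g.1, g.2.1, g.2.2.1, PForest.snoc g.2.2.2 n) :: rs)
  termination_by _ s => s.length

-- one line of A's parse loop (stack stored top-at-head)
def stepA : (List PNode × List (Nat × String × String × PForest)) → String →
    (List PNode × List (Nat × String × String × PForest)) :=
  fun s line0 =>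
    let line := PySem.Str.rstrip line0
    if PySem.Str.strip line = "" then s
    else if PySem.Str.startswith line "#" then
      let level := pvHashLevel line.toList
      -- header = line[level:].strip()  (level ≤ len(line), so the slice is a drop)
      let header := PySem.Str.strip (String.ofList (line.toList.drop level))
      let pr := popA level s.1 s.2
      (pr.1, (level, header, "", PForest.nil) :: pr.2)
    else
      match s.2 with
      | [] => s
      | f :: rest => (s.1, (f.1, f.2.1, pvAddContent f.2.2.1 (PySem.Str.strip line), f.2.2.2) :: rest)

-- A's recursive traverse
mutual
def travN (path : List String) : PNode → List String
  | .mk _ h c ch =>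
    let text := pvText h c
    match ch with
    | .nil => [PySem.Str.join " > " (path ++ [text])]
    | .cons a b => travF (path ++ [text]) (.cons a b)
def travF (path : List String) : PForest → List String
  | .nil => []
  | .cons n t => travN path n ++ travF path t
end

-- for node in root: traverse([], node)
def travRoots (path : List String) : List PNode → List String
  | [] => []
  | n :: t => travN path n ++ travRoots path t

def parse_quiz (md_text : String) : List String :=
  let lines := PySem.Str.splitlines md_text
  let st := lines.foldl stepA ([], [])
  travRoots [] (attachA st.1 st.2)

-- ===== PORT B =====
-- B keeps frames (level, header, content, has_child) and emits a popped childless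
-- frame's path from the live stack; no tree is ever built.
def pvEmit (stack : List (Nat × String × String × Bool)) (top : Nat × String × String × Bool) : String :=
  PySem.Str.join " > " ((stack.reverse.map fun f => pvText f.2.1 f.2.2.1) ++ [pvText top.2.1 top.2.2.1])

-- pop_frames(new_level); None pops everything
def popB : Option Nat → List String → List (Nat × String × String × Bool) →
    List String × List (Nat × String × String × Bool)
  | _, qs, [] => (qs, [])
  | L?, qs, f :: rest =>
    if (match L? with | none => true | some L => decide (L ≤ f.1)) then
      popB L? (if f.2.2.2 then qs else qs ++ [pvEmit rest f]) rest
    else (qs, f :: rest)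
  termination_by _ _ s => s.length

-- one line of B's loop (stack stored top-at-head)
def stepB : (List String × List (Nat × String × String × Bool)) → String →
    (List String × List (Nat × String × String × Bool)) :=
  fun s line0 =>
    let line := PySem.Str.rstrip line0
    if PySem.Str.strip line = "" then s
    else if PySem.Str.startswith line "#" then
      let level := pvHashLevel line.toList
      let header := PySem.Str.strip (String.ofList (line.toList.drop level))
      let pr := popB (some level) s.1 s.2
      match pr.2 with
      | [] => (pr.1, [(level, header, "", false)])
      | g :: rs => (pr.1, (level, header, "", false) :: (g.1, g.2.1, g.2.2.1, true) :: rs)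
    else
      match s.2 with
      | [] => s
      | f :: rest => (s.1, (f.1, f.2.1, pvAddContent f.2.2.1 (PySem.Str.strip line), f.2.2.2) :: rest)

def parse_quiz_alt (md_text : String) : List String :=
  let lines := PySem.Str.splitlines md_text
  let st := lines.foldl stepB ([], [])
  (popB none st.1 st.2).1

-- ===== PRECONDITION & SPEC =====
def Spec_parse_quiz (md_text : String) (out : List String) : Prop := out = parse_quiz_alt md_text
instance (md_text : String) (out : List String) : Decidable (Spec_parse_quiz md_text out) := by unfold Spec_parse_quiz; infer_instance

-- ===== CLAIM (what is proved, stated in full; the proofs are below) =====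
def Claim_equal_parse_quiz : Prop := ∀ (md_text : String), Dom_parse_quiz md_text → Spec_parse_quiz md_text (parse_quiz md_text)

-- ===== LEMMAS AND PROOFS =====

-- B-frame corresponding to an A-frame that has (or will get) a child
def projR (f : Nat × String × String × PForest) : Nat × String × String × Bool :=
  (f.1, f.2.1, f.2.2.1, true)

-- B stack corresponding to an A stack whose top frame carries flag b
def bflags (b : Bool) : List (Nat × String × String × PForest) → List (Nat × String × String × Bool)
  | [] => []
  | f :: r => (f.1, f.2.1, f.2.2.1, b) :: r.map projR

def textF (f : Nat × String × String × PForest) : String := pvText f.2.1 f.2.2.1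

-- questions already fixed by the completed children of the pending frames (bottom-to-top)
def pq (path : List String) : List (Nat × String × String × PForest) → List String
  | [] => []
  | f :: rest => travF (path ++ [textF f]) f.2.2.2 ++ pq (path ++ [textF f]) rest

-- questions B must have emitted so far, given A's state
def Tfun (roots : List PNode) (astack : List (Nat × String × String × PForest)) : List String :=
  travRoots [] roots ++ pq [] astack.reverse

def StRel (sa : List PNode × List (Nat × String × String × PForest))
    (sb : List String × List (Nat × String × String × Bool)) : Prop :=
  sb.1 = Tfun sa.1 sa.2 ∧ sb.2 = bflags false sa.2 ∧
  (∀ f r, sa.2 = f :: r → f.2.2.2 = PForest.nil)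

theorem travN_nil (p : List String) (lv : Nat) (h c : String) :
    travN p (PNode.mk lv h c PForest.nil) = [PySem.Str.join " > " (p ++ [pvText h c])] := rfl

theorem travN_cons (p : List String) (lv : Nat) (h c : String) (a : PNode) (t : PForest) :
    travN p (PNode.mk lv h c (PForest.cons a t)) = travF (p ++ [pvText h c]) (PForest.cons a t) := rfl

theorem travF_nil (p : List String) : travF p PForest.nil = [] := rfl

theorem travF_cons (p : List String) (n : PNode) (t : PForest) :
    travF p (PForest.cons n t) = travN p n ++ travF p t := rfl

theorem snoc_ne_nil (fr : PForest) (n : PNode) : PForest.snoc fr n ≠ PForest.nil := by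
  cases fr <;> simp [PForest.snoc]

theorem travF_snoc : ∀ (fr : PForest) (n : PNode) (p : List String),
    travF p (PForest.snoc fr n) = travF p fr ++ travN p n
  | .nil, n, p => by simp [PForest.snoc, travF_nil, travF_cons]
  | .cons m t, n, p => by simp [PForest.snoc, travF_cons, travF_snoc t n p]

theorem travRoots_append (p : List String) (xs ys : List PNode) :
    travRoots p (xs ++ ys) = travRoots p xs ++ travRoots p ys := by
  induction xs with
  | nil => simp [travRoots]
  | cons n t ih => simp [travRoots, ih]

theorem pq_append (p : List String) (xs ys : List (Nat × String × String × PForest)) :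
    pq p (xs ++ ys) = pq p xs ++ pq (p ++ xs.map textF) ys := by
  induction xs generalizing p with
  | nil => simp [pq]
  | cons f t ih => simp [pq, ih, List.append_assoc]

theorem popA_nil (L : Nat) (roots : List PNode) : popA L roots [] = (roots, []) := by
  rw [popA]

theorem popA_stop {L : Nat} {f : Nat × String × String × PForest}
    (h : ¬ L ≤ f.1) (roots : List PNode) (rest : List (Nat × String × String × PForest)) :
    popA L roots (f :: rest) = (roots, f :: rest) := by
  rw [popA]; simp [h]

theorem popA_last {L : Nat} {f : Nat × String × String × PForest}
    (h : L ≤ f.1) (roots : List PNode) :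
    popA L roots [f] = (roots ++ [PNode.mk f.1 f.2.1 f.2.2.1 f.2.2.2], []) := by
  rw [popA]; simp [h]

theorem popA_step {L : Nat} {f : Nat × String × String × PForest}
    (h : L ≤ f.1) (roots : List PNode) (g : Nat × String × String × PForest)
    (rs : List (Nat × String × String × PForest)) :
    popA L roots (f :: g :: rs) =
    popA L roots ((g.1, g.2.1, g.2.2.1,
      PForest.snoc g.2.2.2 (PNode.mk f.1 f.2.1 f.2.2.1 f.2.2.2)) :: rs) := by
  rw [popA]; simp [h]

theorem popB_nil (L? : Option Nat) (qs : List String) : popB L? qs [] = (qs, []) := by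
  rw [popB]

theorem popB_stop {L : Nat} {f : Nat × String × String × Bool}
    (h : ¬ L ≤ f.1) (qs : List String) (rest : List (Nat × String × String × Bool)) :
    popB (some L) qs (f :: rest) = (qs, f :: rest) := by
  rw [popB]; simp [h]

theorem popB_step_some {L : Nat} {f : Nat × String × String × Bool}
    (h : L ≤ f.1) (qs : List String) (rest : List (Nat × String × String × Bool)) :
    popB (some L) qs (f :: rest) =
    popB (some L) (if f.2.2.2 then qs else qs ++ [pvEmit rest f]) rest := by
  rw [popB]; simp [h]

theorem popB_step_none (qs : List String) (f : Nat × String × String × Bool)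
    (rest : List (Nat × String × String × Bool)) :
    popB none qs (f :: rest) =
    popB none (if f.2.2.2 then qs else qs ++ [pvEmit rest f]) rest := by
  rw [popB]; simp

theorem attachA_nil (roots : List PNode) : attachA roots [] = roots := by
  rw [attachA]

theorem attachA_last (roots : List PNode) (f : Nat × String × String × PForest) :
    attachA roots [f] = roots ++ [PNode.mk f.1 f.2.1 f.2.2.1 f.2.2.2] := by
  rw [attachA]

theorem attachA_step (roots : List PNode) (f g : Nat × String × String × PForest)
    (rs : List (Nat × String × String × PForest)) :
    attachA roots (f :: g :: rs) =
    attachA roots ((g.1, g.2.1, g.2.2.1,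
      PForest.snoc g.2.2.2 (PNode.mk f.1 f.2.1 f.2.2.1 f.2.2.2)) :: rs) := by
  rw [attachA]

theorem comp_text_projR :
    ((fun (f : Nat × String × String × Bool) => pvText f.2.1 f.2.2.1) ∘ projR) = textF := by
  funext x; rfl

theorem travRoots_snoc (roots : List PNode) (n : PNode) :
    travRoots [] (roots ++ [n]) = travRoots [] roots ++ travN [] n := by
  simp [travRoots_append, travRoots]

theorem Tfun_nilhead (roots : List PNode) (f : Nat × String × String × PForest)
    (s : List (Nat × String × String × PForest)) (hf : f.2.2.2 = PForest.nil) :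
    Tfun roots (f :: s) = Tfun roots s := by
  simp [Tfun, pq_append, pq, hf, travF_nil]

theorem pop_core : ∀ (n : Nat) (astack : List (Nat × String × String × PForest)),
    astack.length ≤ n → ∀ roots qs L b,
    (∀ f r, astack = f :: r → (b = true ↔ f.2.2.2 ≠ PForest.nil)) →
    qs = Tfun roots astack →
    (popB (some L) qs (bflags b astack)).1 = Tfun (popA L roots astack).1 (popA L roots astack).2 ∧
    ∃ b', (popB (some L) qs (bflags b astack)).2 = bflags b' (popA L roots astack).2 ∧
          ∀ f r, (popA L roots astack).2 = f :: r → (b' = true ↔ f.2.2.2 ≠ PForest.nil) := by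
  intro n
  induction n with
  | zero =>
    intro astack hlen roots qs L b hb hq
    have : astack = [] := List.eq_nil_of_length_eq_zero (Nat.le_zero.mp hlen)
    subst this
    simp [bflags, popB_nil, popA_nil, hq]
  | succ n ih =>
    intro astack hlen roots qs L b hb hq
    match astack with
    | [] => simp [bflags, popB_nil, popA_nil, hq]
    | f :: rest =>
      have hbf := hb f rest rfl
      by_cases hL : L ≤ f.1
      · -- the top frame is popped
        have hBstep : popB (some L) qs (bflags b (f :: rest)) =
            popB (some L) (if b then qs else qs ++ [pvEmit (rest.map projR) (f.1, f.2.1, f.2.2.1, b)])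
              (rest.map projR) := by
          show popB (some L) qs ((f.1, f.2.1, f.2.2.1, b) :: rest.map projR) = _
          rw [popB_step_some hL]
        match rest with
        | [] =>
          rw [popA_last hL]
          rw [hBstep]
          simp only [List.map_nil, popB_nil]
          refine ⟨?_, b, by simp [bflags], by intro f r h; cases h⟩
          simp only [Tfun, List.reverse_nil, pq, List.append_nil, travRoots_snoc]
          cases b with
          | false =>
            have hnil : f.2.2.2 = PForest.nil := by simpa using hbf
            simp only [if_neg Bool.false_ne_true, hq, Tfun, List.reverse_cons, List.reverse_nil,
              List.nil_append, pq, hnil, travN_nil, travF_nil, pvEmit, List.map_nil, List.append_nil]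
          | true =>
            have hne : f.2.2.2 ≠ PForest.nil := by simpa using hbf
            match hch : f.2.2.2 with
            | .nil => exact absurd hch hne
            | .cons a t =>
              simp [hq, Tfun, pq, hch, travN_cons, textF]
        | g :: rs =>
          rw [popA_step hL]
          set g' : Nat × String × String × PForest :=
            (g.1, g.2.1, g.2.2.1, PForest.snoc g.2.2.2 (PNode.mk f.1 f.2.1 f.2.2.1 f.2.2.2)) with hg'
          have hflags : (g :: rs).map projR = bflags true (g' :: rs) := by
            simp [bflags, projR, hg']
          have hlen' : (g' :: rs).length ≤ n := by
            simpa using Nat.succ_le_succ_iff.mp (by simpa using hlen)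
          have hb' : ∀ p r, g' :: rs = p :: r → (true = true ↔ p.2.2.2 ≠ PForest.nil) := by
            intro p r h
            cases h
            simpa [hg'] using snoc_ne_nil g.2.2.2 _
          have hq' : (if b then qs else qs ++ [pvEmit ((g :: rs).map projR) (f.1, f.2.1, f.2.2.1, b)]) =
              Tfun roots (g' :: rs) := by
            have hrev : (f :: g :: rs).reverse = rs.reverse ++ [g] ++ [f] := by simp
            have hrev' : (g' :: rs).reverse = rs.reverse ++ [g'] := by simp
            cases b with
            | false =>
              have hnil : f.2.2.2 = PForest.nil := by simpa using hbf
              simp [hq, Tfun, hrev, pq_append, pq, hg', travF_snoc, hnil, travN_nil,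
                travF_nil, pvEmit, comp_text_projR, projR, textF, List.append_assoc]
            | true =>
              have hne : f.2.2.2 ≠ PForest.nil := by simpa using hbf
              match hch : f.2.2.2 with
              | .nil => exact absurd hch hne
              | .cons a t =>
                simp [hq, Tfun, hrev, pq_append, pq, hg', travF_snoc, hch, travN_cons,
                  textF, List.append_assoc]
          rw [hBstep, hq', hflags]
          exact ih (g' :: rs) hlen' roots _ L true hb' rfl
      · -- the top frame stays
        rw [popA_stop hL]
        have : popB (some L) qs (bflags b (f :: rest)) = (qs, bflags b (f :: rest)) := by
          show popB (some L) qs ((f.1, f.2.1, f.2.2.1, b) :: rest.map projR) = _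
          rw [popB_stop hL]
          rfl
        rw [this]
        exact ⟨hq, b, rfl, fun p r h => by cases h; exact hbf⟩

theorem fin_core : ∀ (n : Nat) (astack : List (Nat × String × String × PForest)),
    astack.length ≤ n → ∀ roots qs b,
    (∀ f r, astack = f :: r → (b = true ↔ f.2.2.2 ≠ PForest.nil)) →
    qs = Tfun roots astack →
    (popB none qs (bflags b astack)).1 = travRoots [] (attachA roots astack) := by
  intro n
  induction n with
  | zero =>
    intro astack hlen roots qs b hb hq
    have : astack = [] := List.eq_nil_of_length_eq_zero (Nat.le_zero.mp hlen)
    subst this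
    rw [attachA_nil]
    simp [bflags, popB_nil, hq, Tfun, pq]
  | succ n ih =>
    intro astack hlen roots qs b hb hq
    match astack with
    | [] =>
      rw [attachA_nil]
      simp [bflags, popB_nil, hq, Tfun, pq]
    | f :: rest =>
      have hbf := hb f rest rfl
      have hBstep : popB none qs (bflags b (f :: rest)) =
          popB none (if b then qs else qs ++ [pvEmit (rest.map projR) (f.1, f.2.1, f.2.2.1, b)])
            (rest.map projR) := by
        show popB none qs ((f.1, f.2.1, f.2.2.1, b) :: rest.map projR) = _
        rw [popB_step_none]
      match rest with
      | [] =>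
        rw [attachA_last, hBstep]
        simp only [List.map_nil, popB_nil, travRoots_snoc]
        cases b with
        | false =>
          have hnil : f.2.2.2 = PForest.nil := by simpa using hbf
          simp only [if_neg Bool.false_ne_true, hq, Tfun, List.reverse_cons, List.reverse_nil,
            List.nil_append, pq, hnil, travN_nil, travF_nil, pvEmit, List.map_nil, List.append_nil]
        | true =>
          have hne : f.2.2.2 ≠ PForest.nil := by simpa using hbf
          match hch : f.2.2.2 with
          | .nil => exact absurd hch hne
          | .cons a t =>
            simp [hq, Tfun, pq, hch, travN_cons, textF]
      | g :: rs =>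
        rw [attachA_step]
        set g' : Nat × String × String × PForest :=
          (g.1, g.2.1, g.2.2.1, PForest.snoc g.2.2.2 (PNode.mk f.1 f.2.1 f.2.2.1 f.2.2.2)) with hg'
        have hflags : (g :: rs).map projR = bflags true (g' :: rs) := by
          simp [bflags, projR, hg']
        have hlen' : (g' :: rs).length ≤ n := by
          simpa using Nat.succ_le_succ_iff.mp (by simpa using hlen)
        have hb' : ∀ p r, g' :: rs = p :: r → (true = true ↔ p.2.2.2 ≠ PForest.nil) := by
          intro p r h
          cases h
          simpa [hg'] using snoc_ne_nil g.2.2.2 _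
        have hq' : (if b then qs else qs ++ [pvEmit ((g :: rs).map projR) (f.1, f.2.1, f.2.2.1, b)]) =
            Tfun roots (g' :: rs) := by
          have hrev : (f :: g :: rs).reverse = rs.reverse ++ [g] ++ [f] := by simp
          have hrev' : (g' :: rs).reverse = rs.reverse ++ [g'] := by simp
          cases b with
          | false =>
            have hnil : f.2.2.2 = PForest.nil := by simpa using hbf
            simp [hq, Tfun, hrev, pq_append, pq, hg', travF_snoc, hnil, travN_nil,
              travF_nil, pvEmit, comp_text_projR, projR, textF, List.append_assoc]
          | true =>
            have hne : f.2.2.2 ≠ PForest.nil := by simpa using hbf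
            match hch : f.2.2.2 with
            | .nil => exact absurd hch hne
            | .cons a t =>
              simp [hq, Tfun, hrev, pq_append, pq, hg', travF_snoc, hch, travN_cons,
                textF, List.append_assoc]
        rw [hBstep, hq', hflags]
        exact ih (g' :: rs) hlen' roots _ true hb' rfl

theorem step_rel (sa : List PNode × List (Nat × String × String × PForest))
    (sb : List String × List (Nat × String × String × Bool)) (line : String)
    (h : StRel sa sb) : StRel (stepA sa line) (stepB sb line) := by
  obtain ⟨h1, h2, h3⟩ := h
  by_cases hblank : PySem.Str.strip (PySem.Str.rstrip line) = ""
  · simp only [StRel, stepA, stepB, if_pos hblank]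
    exact ⟨h1, h2, h3⟩
  · by_cases hhash : PySem.Str.startswith (PySem.Str.rstrip line) "#" = true
    · -- header line: pop, mark, push
      simp only [StRel, stepA, stepB, if_neg hblank, if_pos hhash]
      rw [h1, h2]
      set lvl := pvHashLevel (PySem.Str.rstrip line).toList with hlvl
      set hdr := PySem.Str.strip (String.ofList ((PySem.Str.rstrip line).toList.drop lvl)) with hhdr
      obtain ⟨hc1, b', hc2, hc3⟩ := pop_core sa.2.length sa.2 le_rfl sa.1 (Tfun sa.1 sa.2) lvl false
        (fun f r hfr => by simp [h3 f r hfr]) rfl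
      cases hstk : (popA lvl sa.1 sa.2).2 with
      | nil =>
        rw [hstk] at hc1
        rw [hstk] at hc2
        have hc2' : (popB (some lvl) (Tfun sa.1 sa.2) (bflags false sa.2)).2 =
            ([] : List (Nat × String × String × Bool)) := hc2
        rw [hc2']
        dsimp only
        refine ⟨?_, rfl, by intro f r hfr; cases hfr; rfl⟩
        rw [hc1, Tfun_nilhead _ (lvl, hdr, "", PForest.nil) [] rfl]
      | cons f' r' =>
        rw [hstk] at hc1
        rw [hstk] at hc2
        have hc2' : (popB (some lvl) (Tfun sa.1 sa.2) (bflags false sa.2)).2 =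
            (f'.1, f'.2.1, f'.2.2.1, b') :: List.map projR r' := hc2
        rw [hc2']
        dsimp only
        refine ⟨?_, by simp [bflags, projR], by intro f r hfr; cases hfr; rfl⟩
        rw [hc1, Tfun_nilhead _ (lvl, hdr, "", PForest.nil) (f' :: r') rfl]
    · -- content line
      simp only [StRel, stepA, stepB, if_neg hblank, if_neg hhash]
      cases hstk : sa.2 with
      | nil =>
        have h2' : sb.2 = ([] : List (Nat × String × String × Bool)) := by rw [h2, hstk]; rfl
        rw [h2']
        dsimp only
        exact ⟨h1, h2, h3⟩
      | cons f rest =>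
        have hnil : f.2.2.2 = PForest.nil := h3 f rest hstk
        have h2' : sb.2 = (f.1, f.2.1, f.2.2.1, false) :: List.map projR rest := by rw [h2, hstk]; rfl
        rw [h2']
        dsimp only
        refine ⟨?_, rfl, ?_⟩
        · rw [h1, hstk, Tfun_nilhead _ f _ hnil, Tfun_nilhead _
            (f.1, f.2.1, pvAddContent f.2.2.1 (PySem.Str.strip (PySem.Str.rstrip line)), f.2.2.2) _ hnil]
        · intro p r hfr
          cases hfr
          exact hnil

theorem fold_rel (lines : List String)
    (sa : List PNode × List (Nat × String × String × PForest))
    (sb : List String × List (Nat × String × String × Bool)) (h : StRel sa sb) :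
    StRel (lines.foldl stepA sa) (lines.foldl stepB sb) := by
  induction lines generalizing sa sb with
  | nil => exact h
  | cons l t ih =>
    rw [List.foldl_cons, List.foldl_cons]
    exact ih _ _ (step_rel _ _ _ h)

-- ===== VERDICT (by name: the statement is the Claim_ definition above) =====
theorem parse_quiz_spec : Claim_equal_parse_quiz := by
  intro md _
  unfold Spec_parse_quiz
  have hrel : StRel (([], []) : List PNode × List (Nat × String × String × PForest))
      (([], []) : List String × List (Nat × String × String × Bool)) := by
    refine ⟨?_, rfl, ?_⟩
    · simp [Tfun, travRoots, pq]
    · intro f r h; cases h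
  obtain ⟨h1, h2, h3⟩ := fold_rel (PySem.Str.splitlines md) ([], []) ([], []) hrel
  show parse_quiz md = parse_quiz_alt md
  unfold parse_quiz parse_quiz_alt
  change travRoots [] (attachA ((PySem.Str.splitlines md).foldl stepA ([], [])).1
      ((PySem.Str.splitlines md).foldl stepA ([], [])).2) =
    (popB none ((PySem.Str.splitlines md).foldl stepB ([], [])).1
      ((PySem.Str.splitlines md).foldl stepB ([], [])).2).1
  rw [h2, fin_core ((PySem.Str.splitlines md).foldl stepA ([], [])).2.length _ le_rfl _ _ false
    (fun f r hfr => by simp [h3 f r hfr]) h1]
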